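-- pv_equiv track=rewrite | github.com/ashokgaire/codeForces | codeForces/round#719(Div.3)/C.py | process
-- ===== SOURCE A (Python) =====
-- def process(n):
--     arr = [[0 for _ in range(n)] for _ in range(n)]
--     c = 1
--
--     for i in range(n):
--         for j in range(n):
--             arr[j][i] = c
--             c += 1
--     return arr
-- ===== SOURCE B (Python) =====
-- def process(n):
--     rows = [list(range(k * n + 1, k * n + n + 1)) for k in range(n)]
--     return [[row[j] for row in rows] for j in range(n)]
-- ===== Notes on version B (the rewrite author's own statement) =====
-- stated objective: alternative
-- what changed: Instead of scatter-writing a running counter column-wise into a zero-initialized matrix, B first builds the row-major matrix whose row k is the range k*n+1..k*n+n, then returns its transpose.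
import Mathlib
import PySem

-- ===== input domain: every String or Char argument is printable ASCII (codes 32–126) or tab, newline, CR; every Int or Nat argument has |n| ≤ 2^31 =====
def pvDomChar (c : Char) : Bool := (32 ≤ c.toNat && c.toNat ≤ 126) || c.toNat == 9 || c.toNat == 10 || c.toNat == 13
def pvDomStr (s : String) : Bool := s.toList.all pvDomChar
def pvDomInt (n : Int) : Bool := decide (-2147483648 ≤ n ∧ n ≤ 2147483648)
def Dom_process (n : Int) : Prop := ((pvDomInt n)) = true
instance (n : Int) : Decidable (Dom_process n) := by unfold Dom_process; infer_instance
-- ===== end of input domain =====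

-- B replaces A's zero-initialized matrix + running counter + column-wise scatter-writes by
-- building the row-major matrix (row k is the range k*n+1..k*n+n) and transposing it
-- (alternative decomposition, same cost).

-- ===== PORT A =====
def process (n : Int) : List (List Int) :=
  let arr : List (List Int) :=
    (PySem.List.pyRange 0 n 1).map (fun _ => (PySem.List.pyRange 0 n 1).map (fun _ => (0 : Int)))
  let st :=
    (PySem.List.pyRange 0 n 1).foldl (fun st i =>
      (PySem.List.pyRange 0 n 1).foldl (fun st j =>
        (PySem.List.pySetD st.1 j
          (PySem.List.pySetD (PySem.List.pyGetD st.1 j []) i st.2), st.2 + 1)) st)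
      (arr, (1 : Int))
  st.1

-- ===== PORT B =====
def process_alt (n : Int) : List (List Int) :=
  let rows := (PySem.List.pyRange 0 n 1).map (fun k =>
    PySem.List.pyRange (k * n + 1) (k * n + n + 1) 1)
  (PySem.List.pyRange 0 n 1).map (fun j =>
    rows.map (fun row => PySem.List.pyGetD row j 0))

-- ===== PRECONDITION & SPEC =====
def Spec_process (n : Int) (out : List (List Int)) : Prop := out = process_alt n
instance (n : Int) (out : List (List Int)) : Decidable (Spec_process n out) := by unfold Spec_process; infer_instance

-- ===== CLAIM (what is proved, stated in full; the proofs are below) =====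
def Claim_equal_process : Prop := ∀ (n : Int), Dom_process n → Spec_process n (process n)

-- ===== LEMMAS AND PROOFS =====

-- matrix after writing columns 0..t-1 (values c0,c0+1,...) into column i
def updCol (i : Nat) (c0 : Int) (t : Nat) (M : List (List Int)) : List (List Int) :=
  M.mapIdx (fun j row => if j < t then row.set i (c0 + j) else row)

lemma inner_fold (i : Nat) (c0 : Int) (M : List (List Int)) (t : Nat) (ht : t ≤ M.length) :
    (List.range t).foldl
      (fun st (k : Nat) =>
        (PySem.List.pySetD st.1 (k : Int)
          (PySem.List.pySetD (PySem.List.pyGetD st.1 (k : Int) []) (i : Int) st.2), st.2 + 1))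
      (M, c0)
    = (updCol i c0 t M, c0 + t) := by
  induction t with
  | zero =>
    simp only [List.range_zero, List.foldl_nil, updCol, Nat.not_lt_zero, if_false,
      Nat.cast_zero, add_zero, Prod.mk.injEq]
    refine ⟨?_, trivial⟩
    simp [List.mapIdx_eq_zipIdx_map]
  | succ t ih =>
    rw [List.range_succ, List.foldl_append, ih (by omega)]
    simp only [List.foldl_cons, List.foldl_nil, PySem.List.pySetD_natCast,
      PySem.List.pyGetD_natCast]
    simp only [Prod.mk.injEq]
    refine ⟨?_, ?_⟩
    · have hlen : (updCol i c0 t M).length = M.length := by simp [updCol]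
      have hget : (updCol i c0 t M).getD t [] = M[t]'(by omega) := by
        rw [List.getD_eq_getElem _ _ (by omega)]
        simp [updCol, List.getElem_mapIdx]
      rw [hget]
      apply List.ext_getElem
      · simp [updCol]
      · intro j h1 h2
        simp only [updCol, List.getElem_set, List.getElem_mapIdx] at *
        by_cases hjt : t = j
        · subst hjt
          simp
        · rw [if_neg hjt]
          split_ifs <;> first | rfl | omega
    · push_cast; ring

lemma outer_fold (m : Nat) (t : Nat) (ht : t ≤ m) :
    (List.range t).foldl
      (fun st (i : Nat) =>
        (List.range m).foldl
          (fun st (k : Nat) =>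
            (PySem.List.pySetD st.1 (k : Int)
              (PySem.List.pySetD (PySem.List.pyGetD st.1 (k : Int) []) (i : Int) st.2), st.2 + 1))
          st)
      ((List.range m).map (fun _ => (List.range m).map (fun _ => (0 : Int))), (1 : Int))
    = ((List.range m).map (fun (j : Nat) =>
         (List.range m).map (fun (i2 : Nat) =>
           if i2 < t then (i2 : Int) * m + (j : Int) + 1 else 0)),
       (t : Int) * m + 1) := by
  induction t with
  | zero => simp
  | succ t ih =>
    rw [List.range_succ, List.foldl_append, ih (by omega)]
    simp only [List.foldl_cons, List.foldl_nil]
    rw [inner_fold t ((t : Int) * m + 1) _ m (by simp)]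
    simp only [Prod.mk.injEq]
    refine ⟨?_, by push_cast; ring⟩
    apply List.ext_getElem
    · simp [updCol]
    · intro j h1 h2
      simp only [updCol, List.getElem_mapIdx, List.getElem_map, List.getElem_range] at *
      rw [if_pos (by simpa [updCol] using h1 : j < m)]
      apply List.ext_getElem
      · simp
      · intro i2 h3 h4
        simp only [List.getElem_set, List.getElem_map, List.getElem_range] at *
        by_cases hit : i2 = t
        · subst hit
          simp only [if_pos (Nat.lt_succ_self i2)]
          push_cast; ring
        · rw [if_neg (fun h => hit h.symm)]
          have : (i2 < t) = (i2 < t + 1) := by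
            apply propext; omega
          split_ifs <;> first | rfl | omega

-- A's result equals the closed-form matrix.
lemma process_closed (m : Nat) :
    process (m : Int) =
      (List.range m).map (fun (j : Nat) =>
        (List.range m).map (fun (i : Nat) => (i : Int) * m + (j : Int) + 1)) := by
  have hr : PySem.List.pyRange 0 (m : Int) 1 = List.map (Nat.cast : Nat → Int) (List.range m) := by
    rw [PySem.List.pyRange_one]; simp
  unfold process
  rw [hr]
  simp only [List.map_map, List.foldl_map, Function.comp_def]
  rw [outer_fold m m le_rfl]
  apply List.map_congr_left
  intro j hj
  apply List.map_congr_left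
  intro i hi
  rw [if_pos (List.mem_range.mp hi)]

-- B's row i is the arithmetic row [i*m+1, ..., i*m+m].
lemma alt_row (m i : Nat) :
    PySem.List.pyRange ((i : Int) * m + 1) ((i : Int) * m + m + 1) 1
    = (List.range m).map (fun (j : Nat) => (i : Int) * m + (j : Int) + 1) := by
  rw [PySem.List.pyRange_one]
  have h : ((i : Int) * m + m + 1 - ((i : Int) * m + 1)).toNat = m := by
    have : ((i : Int) * m + m + 1 - ((i : Int) * m + 1)) = (m : Int) := by ring
    rw [this]; exact Int.toNat_natCast m
  rw [h]
  apply List.map_congr_left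
  intro j hj
  ring

-- B's result equals the closed-form matrix.
lemma alt_closed (m : Nat) :
    process_alt (m : Int) =
      (List.range m).map (fun (j : Nat) =>
        (List.range m).map (fun (i : Nat) => (i : Int) * m + (j : Int) + 1)) := by
  have hr : PySem.List.pyRange 0 (m : Int) 1 = List.map (Nat.cast : Nat → Int) (List.range m) := by
    rw [PySem.List.pyRange_one]; simp
  unfold process_alt
  rw [hr]
  simp only [List.map_map, Function.comp_def]
  apply List.map_congr_left
  intro j hj
  apply List.map_congr_left
  intro i hi
  rw [alt_row m i, PySem.List.pyGetD_natCast,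
    List.getD_eq_getElem _ _ (by simpa using List.mem_range.mp hj)]
  simp

lemma process_eq (n : Int) : process n = process_alt n := by
  by_cases hn : n ≤ 0
  · have h1 : PySem.List.pyRange 0 n 1 = [] := PySem.List.pyRange_one_eq_nil hn
    simp [process, process_alt, h1]
  · obtain ⟨m, hm⟩ : ∃ m : Nat, n = (m : Int) :=
      ⟨n.toNat, (Int.toNat_of_nonneg (by omega)).symm⟩
    subst hm
    rw [process_closed, alt_closed]

-- ===== VERDICT (by name: the statement is the Claim_ definition above) =====
theorem process_spec : Claim_equal_process := by
  intro n _
  unfold Spec_process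
  exact process_eq n
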